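-- pv_equiv track=rewrite | github.com/ghdtjrgns321-creator/k-ifrs-1115 | app/doc-preprocessing/03-regenerate-본문-json.py | classify_block
-- ===== SOURCE A (Python) =====
-- def classify_block(lines: list[str]) -> str | None:
--     """
--     블록의 category를 판별한다.
--
--     판별 순서 (우선순위 순):
--       1. heading1: 첫 번째 비어있지 않은 줄이 # 로 시작
--       2. table: | 가 포함된 줄이 존재
--       3. list: - 로 시작하는 내용 있는 줄이 존재
--       4. paragraph: 위에 해당하지 않는 나머지
--     """
--     non_empty = [line for line in lines if line.strip()]
--     if not non_empty:
--         return None  # 빈 블록은 무시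
--
--     # heading1 판별
--     if non_empty[0].startswith("#"):
--         return "heading1"
--
--     # table 판별
--     if any(line.strip().startswith("|") for line in non_empty):
--         return "table"
--
--     # list 판별: "- " 뒤에 실제 내용이 있는 줄이 1개 이상
--     has_real_list_item = any(
--         line.strip().startswith("- ") and line.strip()[2:].strip()
--         for line in non_empty
--     )
--     if has_real_list_item:
--         return "list"
--
--     return "paragraph"
-- ===== SOURCE B (Python) =====
-- def classify_block(lines: list[str]) -> str | None:
--     """Single pass over lines with flags instead of a filter plus two any-scans."""
--     seen = False
--     has_pipe = False
--     has_list = False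
--     for line in lines:
--         s = line.strip()
--         if not s:
--             continue
--         if not seen:
--             if line.startswith("#"):
--                 return "heading1"
--             seen = True
--         if s.startswith("|"):
--             has_pipe = True
--         if s.startswith("- ") and s[2:].strip():
--             has_list = True
--     if not seen:
--         return None
--     if has_pipe:
--         return "table"
--     if has_list:
--         return "list"
--     return "paragraph"
-- ===== Notes on version B (the rewrite author's own statement) =====
-- stated objective: alternative
-- what changed: Replaced the filtered list plus two separate any-scans by one single pass over the original lines that returns heading1 at the first non-empty line and otherwise accumulates has_pipe/has_list flags.
import Mathlib
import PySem

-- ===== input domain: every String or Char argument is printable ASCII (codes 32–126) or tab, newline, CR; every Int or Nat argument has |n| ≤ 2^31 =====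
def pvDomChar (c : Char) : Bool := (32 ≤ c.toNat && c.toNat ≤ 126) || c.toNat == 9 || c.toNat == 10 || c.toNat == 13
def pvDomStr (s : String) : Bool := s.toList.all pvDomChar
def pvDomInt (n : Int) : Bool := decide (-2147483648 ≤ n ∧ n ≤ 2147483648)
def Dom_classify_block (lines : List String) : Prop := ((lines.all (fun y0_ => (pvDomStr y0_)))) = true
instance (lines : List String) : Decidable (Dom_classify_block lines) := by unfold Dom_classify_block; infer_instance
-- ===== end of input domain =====

-- B changes the decomposition only (one single pass with flags instead of filter + two any-scans); same O(n) cost.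

-- ===== PORT A =====
def classify_block (lines : List String) : Option String :=
  let non_empty := lines.filter (fun line => PySem.Str.strip line != "")
  match non_empty with
  | [] => none
  | first :: _ =>
    if PySem.Str.startswith first "#" then some "heading1"
    else if non_empty.any (fun line => PySem.Str.startswith (PySem.Str.strip line) "|") then
      some "table"
    else if non_empty.any (fun line =>
        PySem.Str.startswith (PySem.Str.strip line) "- " &&
        PySem.Str.strip (PySem.Str.slice (PySem.Str.strip line) (some 2) none) != "") then
      some "list"
    else some "paragraph"

-- ===== PORT B =====
def classify_block_loop : List String → Bool → Bool → Bool → Option String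
  | [], seen, hasPipe, hasList =>
    if !seen then none
    else if hasPipe then some "table"
    else if hasList then some "list"
    else some "paragraph"
  | line :: rest, seen, hasPipe, hasList =>
    let s := PySem.Str.strip line
    if s == "" then classify_block_loop rest seen hasPipe hasList
    else if !seen && PySem.Str.startswith line "#" then some "heading1"
    else
      classify_block_loop rest true
        (hasPipe || PySem.Str.startswith s "|")
        (hasList || (PySem.Str.startswith s "- " &&
          PySem.Str.strip (PySem.Str.slice s (some 2) none) != ""))

def classify_block_alt (lines : List String) : Option String :=
  classify_block_loop lines false false false

-- ===== PRECONDITION & SPEC =====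
def Spec_classify_block (lines : List String) (out : Option String) : Prop := out = classify_block_alt lines
instance (lines : List String) (out : Option String) : Decidable (Spec_classify_block lines out) := by unfold Spec_classify_block; infer_instance

-- ===== CLAIM (what is proved, stated in full; the proofs are below) =====
def Claim_equal_classify_block : Prop := ∀ (lines : List String), Dom_classify_block lines → Spec_classify_block lines (classify_block lines)

-- ===== LEMMAS AND PROOFS =====

def pvPipe (line : String) : Bool :=
  (PySem.Str.strip line != "") && PySem.Str.startswith (PySem.Str.strip line) "|"

def pvListItem (line : String) : Bool :=
  (PySem.Str.strip line != "") && (PySem.Str.startswith (PySem.Str.strip line) "- " &&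
    PySem.Str.strip (PySem.Str.slice (PySem.Str.strip line) (some 2) none) != "")

theorem classify_block_loop_seen (rest : List String) :
    ∀ (p l : Bool), classify_block_loop rest true p l =
      some (if p || rest.any pvPipe then "table"
            else if l || rest.any pvListItem then "list"
            else "paragraph") := by
  induction rest with
  | nil => intro p l; cases p <;> cases l <;> rfl
  | cons line rest ih =>
    intro p l
    by_cases h : PySem.Str.strip line = ""
    · simp [classify_block_loop, h, ih, pvPipe, pvListItem]
    · simp [classify_block_loop, h, ih, pvPipe, pvListItem, Bool.or_assoc]

theorem classify_block_eq_alt (lines : List String) :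
    classify_block lines = classify_block_alt lines := by
  induction lines with
  | nil => rfl
  | cons line rest ih =>
    by_cases h : PySem.Str.strip line = ""
    · simpa [classify_block, classify_block_alt, classify_block_loop, h] using ih
    · simp only [classify_block, classify_block_alt, classify_block_loop, List.filter_cons,
        bne_iff_ne, ne_eq, h, not_false_eq_true, if_true]
      by_cases hh : PySem.Chars.startswith line.toList ['#'] = true
      · simp [hh]
        exact fun h' => absurd h' h
      · simp only [Bool.not_eq_true] at hh
        rw [classify_block_loop_seen]
        simp [List.any_filter, pvPipe, pvListItem, h, hh]
        split_ifs <;> rfl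

-- ===== VERDICT (by name: the statement is the Claim_ definition above) =====
theorem classify_block_spec : Claim_equal_classify_block := by
  intro lines _
  exact classify_block_eq_alt lines
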